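-- pv_equiv track=rewrite | github.com/sam-xif/corpalizer | src/api/services.py | break_document_into_paragraphs
-- ===== SOURCE A (Python) =====
-- def break_document_into_paragraphs(doc):
--     """
--     Extracts information about paragraphs in the given document
--     :param doc: The document text
--     :return: A list of 3-tuples, which are start and end indices of each paragraph within the given string, and the paragraph text itself as the third item
--     """
--     splits = []
--     last_end = 0
--     for i, char in enumerate(doc):
--         if char == '\n':
--             splits.append((last_end, i, doc[last_end:i]))
--             last_end = i
--
--     splits.append((last_end, len(doc), doc[last_end:]))
--
--     return splits
-- ===== SOURCE B (Python) =====
-- def break_document_into_paragraphs(doc):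
--     idxs = [i for i, c in enumerate(doc) if c == '\n']
--     starts = [0] + idxs
--     ends = idxs + [len(doc)]
--     return [(s, e, doc[s:e]) for s, e in zip(starts, ends)]
-- ===== Notes on version B (the rewrite author's own statement) =====
-- stated objective: alternative
-- what changed: Replaces the single-pass loop with mutable (splits, last_end) state by a two-phase construction: first a table of newline positions, then boundary lists starts/ends zipped into the result.
import Mathlib
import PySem

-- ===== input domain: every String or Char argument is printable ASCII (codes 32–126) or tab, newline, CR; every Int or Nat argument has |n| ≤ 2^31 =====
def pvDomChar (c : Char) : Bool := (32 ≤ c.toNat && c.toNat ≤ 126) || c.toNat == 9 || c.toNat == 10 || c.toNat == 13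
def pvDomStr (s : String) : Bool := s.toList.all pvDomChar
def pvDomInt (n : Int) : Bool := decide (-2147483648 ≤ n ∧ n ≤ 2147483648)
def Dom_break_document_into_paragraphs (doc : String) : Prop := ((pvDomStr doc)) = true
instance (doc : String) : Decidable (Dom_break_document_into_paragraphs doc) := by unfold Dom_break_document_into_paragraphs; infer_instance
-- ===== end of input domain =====

-- B replaces A's single-pass loop with mutable (splits, last_end) state by a two-phase
-- construction: a table of newline positions, then boundary lists starts/ends zipped
-- into the result (objective: alternative decomposition, same cost).


-- ===== PORT A =====
-- the loop body: state = (splits, last_end), one enumerate step (i, char)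
def pvStepA (doc : String) (st : List (Int × Int × String) × Int) (p : Int × Char) :
    List (Int × Int × String) × Int :=
  if p.2 = '\n' then (st.1 ++ [(st.2, p.1, PySem.Str.slice doc (some st.2) (some p.1))], p.1)
  else st

def break_document_into_paragraphs (doc : String) : List (Int × Int × String) :=
  let st := (PySem.List.enumerate doc.toList).foldl (pvStepA doc) ([], 0)
  st.1 ++ [(st.2, PySem.Str.len doc, PySem.Str.slice doc (some st.2) none)]

-- ===== PORT B =====
def break_document_into_paragraphs_alt (doc : String) : List (Int × Int × String) :=
  let idxs := ((PySem.List.enumerate doc.toList).filter (fun p => p.2 = '\n')).map (·.1)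
  let starts := 0 :: idxs
  let ends := idxs ++ [PySem.Str.len doc]
  (starts.zip ends).map (fun p => (p.1, p.2, PySem.Str.slice doc (some p.1) (some p.2)))

-- ===== PRECONDITION & SPEC =====
def Spec_break_document_into_paragraphs (doc : String) (out : List (Int × Int × String)) : Prop := out = break_document_into_paragraphs_alt doc
instance (doc : String) (out : List (Int × Int × String)) : Decidable (Spec_break_document_into_paragraphs doc out) := by unfold Spec_break_document_into_paragraphs; infer_instance

-- ===== CLAIM (what is proved, stated in full; the proofs are below) =====
def Claim_equal_break_document_into_paragraphs : Prop := ∀ (doc : String), Dom_break_document_into_paragraphs doc → Spec_break_document_into_paragraphs doc (break_document_into_paragraphs doc)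

-- ===== LEMMAS AND PROOFS =====

-- proof-side helpers
def pvIdxs (ps : List (Int × Char)) : List Int :=
  (ps.filter (fun p => p.2 = '\n')).map (·.1)

def pvSeg (doc : String) (p : Int × Int) : Int × Int × String :=
  (p.1, p.2, PySem.Str.slice doc (some p.1) (some p.2))

-- every index produced by enumerate is at least the start value
theorem pv_enumerate_fst_ge {α : Type} (xs : List α) (s : Int) :
    ∀ p ∈ PySem.List.enumerate xs s, s ≤ p.1 := by
  induction xs generalizing s with
  | nil => simp [PySem.List.enumerate_nil]
  | cons x xs ih =>
    intro p hp
    rw [PySem.List.enumerate_cons] at hp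
    rcases List.mem_cons.mp hp with h | h
    · simp [h]
    · have := ih (s + 1) p h; omega

-- zipping starts with ends splits off the final segment
theorem pv_zip_shift {α : Type} (l s n : _) :
    (s :: l).zip (l ++ [n]) = (s :: l).zip l ++ [((l.getLastD s : α), n)] := by
  induction l generalizing s with
  | nil => simp
  | cons a l ih =>
    simp only [List.cons_append, List.zip_cons_cons, List.getLastD_cons]
    rw [ih a]

-- invariant of A's fold: accumulated splits are the zip of consecutive newline
-- positions (prefixed by the incoming last_end), and last_end is the last one seen
theorem pv_foldA (doc : String) (ps : List (Int × Char))
    (acc : List (Int × Int × String)) (s : Int) :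
    ps.foldl (pvStepA doc) (acc, s) =
      (acc ++ ((s :: pvIdxs ps).zip (pvIdxs ps)).map (pvSeg doc),
       (pvIdxs ps).getLastD s) := by
  induction ps generalizing acc s with
  | nil => simp [pvIdxs]
  | cons p ps ih =>
    by_cases h : p.2 = '\n'
    · simp only [List.foldl_cons, pvStepA, if_pos h, pvIdxs, List.filter_cons,
        decide_eq_true h, if_pos trivial]
      rw [ih]
      simp only [List.zip_cons_cons, List.map_cons, List.getLastD_cons, pvSeg,
        List.append_assoc, List.singleton_append]
      rfl
    · simp only [List.foldl_cons, pvStepA, if_neg h, pvIdxs, List.filter_cons]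
      rw [if_neg (by simpa using h)]
      exact ih acc s

-- doc[a:] = doc[a:len(doc)] for a nonnegative start
theorem pv_slice_from_eq (doc : String) (a : Int) (ha : 0 ≤ a) :
    PySem.Str.slice doc (some a) none = PySem.Str.slice doc (some a) (some (PySem.Str.len doc)) := by
  simp only [PySem.Str.slice, PySem.Str.len]
  congr 1
  simp only [PySem.Chars.slice_eq_listSlice]
  rw [PySem.List.slice_from _ ha, PySem.List.slice_toNat _ ha (by positivity)]
  exact (List.take_of_length_le (by simp [Int.toNat_natCast])).symm

theorem break_document_into_paragraphs_eq (doc : String) :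
    break_document_into_paragraphs doc = break_document_into_paragraphs_alt doc := by
  simp only [break_document_into_paragraphs, break_document_into_paragraphs_alt, pv_foldA]
  rw [show (((PySem.List.enumerate doc.toList).filter (fun p => p.2 = '\n')).map (·.1))
      = pvIdxs (PySem.List.enumerate doc.toList) from rfl]
  set idxs := pvIdxs (PySem.List.enumerate doc.toList) with hidxs
  have h0 : 0 ≤ idxs.getLastD 0 := by
    rcases List.eq_nil_or_concat idxs with h | ⟨l, a, h⟩
    · simp [h]
    · have ha : a ∈ idxs := by simp [h]
      rw [hidxs, pvIdxs] at ha
      obtain ⟨p, hp, hpa⟩ := List.mem_map.mp ha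
      have hge := pv_enumerate_fst_ge doc.toList 0 p (List.mem_of_mem_filter hp)
      have hA : (l.concat a).getLastD 0 = a := by
        simp [List.concat_eq_append, List.getLastD_eq_getLast?]
      rw [h, hA]
      omega
  rw [pv_zip_shift, List.map_append, pv_slice_from_eq doc _ h0]
  rfl

-- ===== VERDICT (by name: the statement is the Claim_ definition above) =====
theorem break_document_into_paragraphs_spec : Claim_equal_break_document_into_paragraphs := by
  intro doc _
  unfold Spec_break_document_into_paragraphs
  exact break_document_into_paragraphs_eq doc
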